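-- pv_equiv track=rewrite | github.com/jrodzon/microservice-translator | project_translator/core/request_executor.py | _check_response_content
-- ===== SOURCE A (Python) =====
-- from typing import Dict, List, Any, Optional
--
-- def _check_response_content(response_data: Any, expected: Dict[str, Any]) -> bool:
--     """Check if response matches expected content."""
--     if not isinstance(response_data, dict):
--         return False
--
--     for key, expected_value in expected.items():
--         if key not in response_data:
--             return False
--         if response_data[key] != expected_value:
--             return False
--
--     return True
-- ===== SOURCE B (Python) =====
-- def _check_response_content(response_data, expected):
--     """Check if response matches expected content."""
--     if not isinstance(response_data, dict):
--         return False
--     pending = dict(expected)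
--     for key, value in response_data.items():
--         if key in pending and pending[key] == value:
--             del pending[key]
--     return not pending
-- ===== Notes on version B (the rewrite author's own statement) =====
-- stated objective: alternative
-- what changed: B traverses response_data instead of expected: it scans the response once, checking matching items off a pending copy of expected, and returns whether every expectation was checked off, replacing A's early-returning probe loop over expected.
import Mathlib
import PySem

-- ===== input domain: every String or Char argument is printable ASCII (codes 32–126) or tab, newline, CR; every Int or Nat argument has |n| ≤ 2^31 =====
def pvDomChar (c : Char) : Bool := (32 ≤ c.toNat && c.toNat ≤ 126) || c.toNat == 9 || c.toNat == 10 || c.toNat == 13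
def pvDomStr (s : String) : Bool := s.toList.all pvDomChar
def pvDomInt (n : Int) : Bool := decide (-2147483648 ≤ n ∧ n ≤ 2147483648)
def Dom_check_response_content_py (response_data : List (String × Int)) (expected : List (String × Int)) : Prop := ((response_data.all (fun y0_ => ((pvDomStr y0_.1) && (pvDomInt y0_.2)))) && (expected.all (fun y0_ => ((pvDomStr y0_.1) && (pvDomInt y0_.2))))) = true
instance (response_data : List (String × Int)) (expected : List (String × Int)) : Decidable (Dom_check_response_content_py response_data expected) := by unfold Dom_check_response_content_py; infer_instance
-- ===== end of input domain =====

-- B traverses response_data instead of expected: it checks matching items off a pending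
-- copy of expected and returns whether everything was checked off (alternative; same cost).
-- Both arguments are dicts here, so A's isinstance guard is always satisfied.

-- ===== PORT A =====
-- for key, expected_value in expected.items(): early-returning probe of response_data
def check_response_content_py (response_data : List (String × Int)) (expected : List (String × Int)) : Bool :=
  match expected with
  | [] => true
  | (key, expected_value) :: rest =>
    match (PySem.Dict.mk response_data).get? key with
    | none => false                         -- if key not in response_data: return False
    | some v =>
      if v != expected_value then false     -- if response_data[key] != expected_value: return False
      else check_response_content_py response_data rest

-- ===== PORT B =====
-- the loop body: if key in pending and pending[key] == value: del pending[key]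
def pvStepB (p : PySem.Dict String Int) (kv : String × Int) : PySem.Dict String Int :=
  match p.get? kv.1 with
  | some v => if v == kv.2 then p.erase kv.1 else p
  | none => p

-- pending = dict(expected); for key, value in response_data.items(): …; return not pending
def check_response_content_py_alt (response_data : List (String × Int)) (expected : List (String × Int)) : Bool :=
  (response_data.foldl pvStepB (PySem.Dict.mk expected)).items.isEmpty

-- ===== PRECONDITION & SPEC =====
-- Pre_ excludes association lists with duplicate keys: both parameters are Python dicts,
-- so a duplicate-key list represents no actual input, and the ports' first-match/filter
-- behaviour on such lists is accidental.
def Pre_check_response_content_py (response_data : List (String × Int)) (expected : List (String × Int)) : Prop :=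
  (response_data.map Prod.fst).Nodup ∧ (expected.map Prod.fst).Nodup
instance (response_data : List (String × Int)) (expected : List (String × Int)) : Decidable (Pre_check_response_content_py response_data expected) := by unfold Pre_check_response_content_py; infer_instance

def pvWitness_check_response_content_py : (List (String × Int)) × (List (String × Int)) :=
  ([("a", 1), ("b", 2)], [("b", 2)])

def Spec_check_response_content_py (response_data : List (String × Int)) (expected : List (String × Int)) (out : Bool) : Prop := out = check_response_content_py_alt response_data expected
instance (response_data : List (String × Int)) (expected : List (String × Int)) (out : Bool) : Decidable (Spec_check_response_content_py response_data expected out) := by unfold Spec_check_response_content_py; infer_instance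

-- ===== CLAIM (what is proved, stated in full; the proofs are below) =====
def Claim_equal_check_response_content_py : Prop := ∀ (response_data : List (String × Int)) (expected : List (String × Int)), Dom_check_response_content_py response_data expected → Pre_check_response_content_py response_data expected → Spec_check_response_content_py response_data expected (check_response_content_py response_data expected)

-- ===== LEMMAS AND PROOFS =====

-- A's scan is the conjunction over expected of "response has this key with this value"
theorem checkA_eq_all (response_data expected : List (String × Int)) :
    check_response_content_py response_data expected
      = expected.all (fun kv => (PySem.Dict.mk response_data).get? kv.1 == some kv.2) := by
  induction expected with
  | nil => rfl
  | cons hd rest ih =>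
    obtain ⟨k, ev⟩ := hd
    simp only [check_response_content_py, List.all_cons]
    rcases h : (PySem.Dict.mk response_data).get? k with _ | v
    · simp
    · by_cases hv : v = ev
      · subst hv; simp [ih]
      · simp [hv]

-- erase is a filter on the items list (definitional)
theorem erase_items (p : PySem.Dict String Int) (k : String) :
    (p.erase k).items = p.items.filter (fun q => !(q.1 == k)) := rfl

-- if a key is not pending, no pending item carries it
theorem no_item_of_get?_none (p : PySem.Dict String Int) (k : String)
    (hget : p.get? k = none) : ∀ q ∈ p.items, (k == q.1) = false := by
  intro q hq
  simp only [PySem.Dict.get?, Option.map_eq_none_iff, List.find?_eq_none] at hget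
  have := hget q hq
  cases hh : (k == q.1)
  · rfl
  · exact absurd (by simp [beq_iff_eq.mp hh]) this

-- l.all f = isEmpty of the items failing f
theorem all_eq_isEmpty_filter_not (l : List (String × Int)) (f : String × Int → Bool) :
    l.all f = (l.filter (fun x => !(f x))).isEmpty := by
  induction l with
  | nil => rfl
  | cons h t ih => cases hf : f h <;> simp [hf, ih]

-- one pass of B's loop keeps exactly the pending items the scanned response entries do not match
theorem foldl_stepB_items (R : List (String × Int)) :
    ∀ (p : PySem.Dict String Int), (R.map Prod.fst).Nodup → p.keys.Nodup →
      (R.foldl pvStepB p).items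
        = p.items.filter (fun kv => !((PySem.Dict.mk R).get? kv.1 == some kv.2)) := by
  induction R with
  | nil =>
    intro p _ _
    simp [PySem.Dict.get?]
  | cons hd rest ih =>
    intro p hR hp
    obtain ⟨k, v⟩ := hd
    simp only [List.map_cons, List.nodup_cons] at hR
    obtain ⟨hk_rest, hrest⟩ := hR
    have hlookup_rest_k : (PySem.Dict.mk rest).get? k = none := by
      simp only [PySem.Dict.get?, Option.map_eq_none_iff, List.find?_eq_none]
      intro q hq hqk
      exact hk_rest (List.mem_map.mpr ⟨q, hq, (beq_iff_eq.mp hqk)⟩)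
    simp only [List.foldl_cons]
    rcases hget : p.get? k with _ | w
    · -- key not pending: step leaves p unchanged
      rw [show pvStepB p (k, v) = p from by simp [pvStepB, hget]]
      rw [ih p hrest hp]
      apply List.filter_congr
      intro q hq
      rw [PySem.Dict.get?_mk_cons, no_item_of_get?_none p k hget q hq]
      simp
    · by_cases hw : w = v
      · -- match: erase k, recurse
        rw [show pvStepB p (k, v) = p.erase k from by simp [pvStepB, hget, hw]]
        have hp' : (p.erase k).keys.Nodup := by
          have hsub : (p.erase k).keys.Sublist p.keys := by
            simp only [PySem.Dict.keys, erase_items]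
            exact List.Sublist.map _ List.filter_sublist
          exact hsub.nodup hp
        rw [ih (p.erase k) hrest hp', erase_items, List.filter_filter]
        apply List.filter_congr
        intro q hq
        rw [PySem.Dict.get?_mk_cons]
        cases hh : (k == q.1)
        · have hne : ¬ k = q.1 := by simpa using hh
          simp [Ne.symm hne]
        · -- q carries key k; nodup keys force q = (k, w)
          have hq1 : q.1 = k := (beq_iff_eq.mp hh).symm
          have hmem : (k, q.2) ∈ p.items := by
            have : (q.1, q.2) ∈ p.items := by simpa using hq
            rwa [hq1] at this
          have hqv : q.2 = w := by
            have hg := PySem.Dict.get?_of_mem_items p hmem hp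
            rw [hg] at hget
            exact Option.some.inj hget
          simp [hq1, hqv, hw]
      · -- value mismatch: p unchanged; the key-k entry stays pending on both sides
        rw [show pvStepB p (k, v) = p from by simp [pvStepB, hget, hw]]
        rw [ih p hrest hp]
        apply List.filter_congr
        intro q hq
        rw [PySem.Dict.get?_mk_cons]
        cases hh : (k == q.1)
        · simp
        · have hq1 : q.1 = k := (beq_iff_eq.mp hh).symm
          have hmem : (k, q.2) ∈ p.items := by
            have : (q.1, q.2) ∈ p.items := by simpa using hq
            rwa [hq1] at this
          have hqv : q.2 = w := by
            have hg := PySem.Dict.get?_of_mem_items p hmem hp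
            rw [hg] at hget
            exact Option.some.inj hget
          have hlr : (PySem.Dict.mk rest).get? q.1 = none := by rw [hq1]; exact hlookup_rest_k
          simp [hlr, hqv, Ne.symm hw]

-- ===== VERDICT (by name: the statement is the Claim_ definition above) =====
theorem check_response_content_py_spec : Claim_equal_check_response_content_py := by
  intro response_data expected _ hpre
  obtain ⟨hR, hE⟩ := hpre
  unfold Spec_check_response_content_py check_response_content_py_alt
  have hEkeys : (PySem.Dict.mk expected : PySem.Dict String Int).keys.Nodup := by
    simpa [PySem.Dict.keys] using hE
  rw [foldl_stepB_items response_data (PySem.Dict.mk expected) hR hEkeys]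
  rw [checkA_eq_all]
  exact all_eq_isEmpty_filter_not expected _
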